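-- pv_equiv track=rewrite | github.com/Ambitus-Intelligence/ambitus-ai-models | src/cli/tui/agent_runner/display_utils.py | style_gap_analysis_data
-- ===== SOURCE A (Python) =====
-- from typing import Dict, List, Any
--
-- def style_gap_analysis_data(data: List[Dict]) -> str:
--     """Style market gap analysis data"""
--     output = f"🔍 MARKET GAP ANALYSIS\n{'='*50}\n\n"
--
--     if not data:
--         return output + "No market gaps identified."
--
--     # Ensure data is a list
--     if not isinstance(data, list):
--         return output + f"Invalid data format: expected list, got {type(data).__name__}"
--
--     # Group by impact level
--     high_impact = [gap for gap in data if gap.get('impact', '').lower() == 'high']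
--     medium_impact = [gap for gap in data if gap.get('impact', '').lower() == 'medium']
--     low_impact = [gap for gap in data if gap.get('impact', '').lower() == 'low']
--     other_impact = [gap for gap in data if gap.get('impact', '').lower() not in ['high', 'medium', 'low']]
--
--     for impact_level, gaps, emoji in [
--         ('HIGH IMPACT', high_impact, '🔥'),
--         ('MEDIUM IMPACT', medium_impact, '⚡'),
--         ('LOW IMPACT', low_impact, '💡'),
--         ('OTHER', other_impact, '📍')
--     ]:
--         if gaps:
--             output += f"{emoji} {impact_level} GAPS ({len(gaps)})\n{'-'*40}\n"
--             for i, gap in enumerate(gaps, 1):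
--                 output += f"\n{i}. {gap.get('gap', 'Unknown gap')}\n"
--                 output += f"   Impact: {gap.get('impact', 'Not specified')}\n"
--                 output += f"   Evidence: {gap.get('evidence', 'No evidence provided')}\n"
--                 source = gap.get('source', 'No source')
--                 output += f"   Source: {source}\n"
--             output += "\n"
--
--     return output
-- ===== SOURCE B (Python) =====
-- def _item(i, gap):
--     return (f"\n{i}. {gap.get('gap', 'Unknown gap')}\n"
--             f"   Impact: {gap.get('impact', 'Not specified')}\n"
--             f"   Evidence: {gap.get('evidence', 'No evidence provided')}\n"
--             f"   Source: {gap.get('source', 'No source')}\n")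
--
--
-- def _section(label, emoji, gaps):
--     head = f"{emoji} {label} GAPS ({len(gaps)})\n" + "-" * 40 + "\n"
--     return head + "".join(_item(i, g) for i, g in enumerate(gaps, 1)) + "\n"
--
--
-- def style_gap_analysis_data(data):
--     """Style market gap analysis data"""
--     header = "🔍 MARKET GAP ANALYSIS\n" + "=" * 50 + "\n\n"
--     if not data:
--         return header + "No market gaps identified."
--     high, medium, low, other = [], [], [], []
--     for gap in data:
--         cat = gap.get('impact', '').lower()
--         if cat == 'high':
--             high.append(gap)
--         elif cat == 'medium':
--             medium.append(gap)
--         elif cat == 'low':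
--             low.append(gap)
--         else:
--             other.append(gap)
--     return header + "".join(
--         _section(label, emoji, gaps)
--         for label, gaps, emoji in [('HIGH IMPACT', high, '🔥'),
--                                    ('MEDIUM IMPACT', medium, '⚡'),
--                                    ('LOW IMPACT', low, '💡'),
--                                    ('OTHER', other, '📍')]
--         if gaps)
-- ===== Notes on version B (the rewrite author's own statement) =====
-- stated objective: alternative
-- what changed: Replaces A's four separate filtering scans of the data with a single bucketing pass (one loop dispatching each gap into high/medium/low/other), and emits the output by composing per-section helper strings joined together instead of repeated in-place concatenation.
import Mathlib
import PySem

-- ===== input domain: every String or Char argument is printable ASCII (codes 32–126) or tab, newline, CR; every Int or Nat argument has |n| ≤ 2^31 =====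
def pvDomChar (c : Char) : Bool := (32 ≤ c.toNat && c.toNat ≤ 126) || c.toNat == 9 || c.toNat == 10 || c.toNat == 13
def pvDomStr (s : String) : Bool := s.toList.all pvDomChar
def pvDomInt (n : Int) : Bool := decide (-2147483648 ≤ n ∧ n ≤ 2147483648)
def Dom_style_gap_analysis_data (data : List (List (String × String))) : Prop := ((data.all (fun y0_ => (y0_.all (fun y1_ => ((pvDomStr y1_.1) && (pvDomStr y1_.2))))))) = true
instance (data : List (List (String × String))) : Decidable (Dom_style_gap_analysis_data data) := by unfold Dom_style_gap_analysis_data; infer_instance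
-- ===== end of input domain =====

-- B does the same formatting by a single bucketing pass over the data (instead of A's four
-- filtering scans) and composes the output from per-section helper strings (alternative decomposition).

-- gap.get(k, d): first-matching-key lookup in the association list (exact for Python dicts)
def pvGet (gap : List (String × String)) (k d : String) : String :=
  match gap.find? (fun p => p.1 == k) with
  | some p => p.2
  | none => d

-- cat = gap.get('impact', '').lower() — the category expression both versions compute
def pvImpact (gap : List (String × String)) : String :=
  PySem.Str.lower (pvGet gap "impact" "")

-- ===== PORT A =====

def style_gap_analysis_data (data : List (List (String × String))) : String :=
  let output := "🔍 MARKET GAP ANALYSIS\n" ++ "==================================================" ++ "\n\n"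
  if data = [] then output ++ "No market gaps identified."
  else
    let high := data.filter (fun gap => pvImpact gap == "high")
    let medium := data.filter (fun gap => pvImpact gap == "medium")
    let low := data.filter (fun gap => pvImpact gap == "low")
    let other := data.filter (fun gap => !(["high", "medium", "low"].contains (pvImpact gap)))
    List.foldl (fun output t =>
        if t.2.1 = [] then output
        else
          let output := output ++ t.2.2 ++ " " ++ t.1 ++ " GAPS (" ++ PySem.Int.toStr (t.2.1.length : Int) ++ ")\n" ++ "----------------------------------------" ++ "\n"
          let output := (PySem.List.enumerate t.2.1 1).foldl (fun output p =>
            let output := output ++ "\n" ++ PySem.Int.toStr p.1 ++ ". " ++ pvGet p.2 "gap" "Unknown gap" ++ "\n"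
            let output := output ++ "   Impact: " ++ pvGet p.2 "impact" "Not specified" ++ "\n"
            let output := output ++ "   Evidence: " ++ pvGet p.2 "evidence" "No evidence provided" ++ "\n"
            let source := pvGet p.2 "source" "No source"
            output ++ "   Source: " ++ source ++ "\n") output
          output ++ "\n")
      output
      [("HIGH IMPACT", high, "🔥"), ("MEDIUM IMPACT", medium, "⚡"),
       ("LOW IMPACT", low, "💡"), ("OTHER", other, "📍")]

-- ===== PORT B =====
-- the four buckets high/medium/low/other, filled by one pass over the data
def Buckets : Type :=
  List (List (String × String)) × List (List (String × String)) ×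
  List (List (String × String)) × List (List (String × String))

def bStep (acc : Buckets) (gap : List (String × String)) : Buckets :=
  let cat := pvImpact gap
  if cat == "high" then (acc.1 ++ [gap], acc.2.1, acc.2.2.1, acc.2.2.2)
  else if cat == "medium" then (acc.1, acc.2.1 ++ [gap], acc.2.2.1, acc.2.2.2)
  else if cat == "low" then (acc.1, acc.2.1, acc.2.2.1 ++ [gap], acc.2.2.2)
  else (acc.1, acc.2.1, acc.2.2.1, acc.2.2.2 ++ [gap])

def bItem (p : Int × List (String × String)) : String :=
  "\n" ++ PySem.Int.toStr p.1 ++ ". " ++ pvGet p.2 "gap" "Unknown gap" ++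
  "\n   Impact: " ++ pvGet p.2 "impact" "Not specified" ++
  "\n   Evidence: " ++ pvGet p.2 "evidence" "No evidence provided" ++
  "\n   Source: " ++ pvGet p.2 "source" "No source" ++ "\n"

def bSection (label emoji : String) (gaps : List (List (String × String))) : String :=
  let head := emoji ++ " " ++ label ++ " GAPS (" ++ PySem.Int.toStr (gaps.length : Int) ++ ")\n" ++ "----------------------------------------" ++ "\n"
  head ++ PySem.Str.join "" ((PySem.List.enumerate gaps 1).map bItem) ++ "\n"

def style_gap_analysis_data_alt (data : List (List (String × String))) : String :=
  let header := "🔍 MARKET GAP ANALYSIS\n" ++ "==================================================" ++ "\n\n"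
  if data = [] then header ++ "No market gaps identified."
  else
    let buckets := data.foldl bStep (([], [], [], []) : Buckets)
    header ++ PySem.Str.join ""
      (([("HIGH IMPACT", buckets.1, "🔥"), ("MEDIUM IMPACT", buckets.2.1, "⚡"),
          ("LOW IMPACT", buckets.2.2.1, "💡"), ("OTHER", buckets.2.2.2, "📍")].filter
            (fun t => !t.2.1.isEmpty)).map (fun t => bSection t.1 t.2.2 t.2.1))

-- ===== PRECONDITION & SPEC =====
def Spec_style_gap_analysis_data (data : List (List (String × String))) (out : String) : Prop := out = style_gap_analysis_data_alt data
instance (data : List (List (String × String))) (out : String) : Decidable (Spec_style_gap_analysis_data data out) := by unfold Spec_style_gap_analysis_data; infer_instance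

-- ===== CLAIM (what is proved, stated in full; the proofs are below) =====
def Claim_equal_style_gap_analysis_data : Prop := ∀ (data : List (List (String × String))), Dom_style_gap_analysis_data data → Spec_style_gap_analysis_data data (style_gap_analysis_data data)

-- ===== LEMMAS AND PROOFS =====

theorem pv_join_nil : PySem.Str.join "" [] = "" := by
  simp [PySem.Str.join, PySem.Chars.join_nil]

theorem pv_join_cons (x : String) (xs : List String) :
    PySem.Str.join "" (x :: xs) = x ++ PySem.Str.join "" xs := by
  cases xs with
  | nil => simp [PySem.Str.join, PySem.Chars.join_singleton, PySem.Chars.join_nil]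
  | cons y ys => simp [PySem.Str.join, PySem.Chars.join_cons_cons]

-- B's one-pass bucketing computes exactly A's four filters
theorem bucket_eq (l : List (List (String × String)))
    (a b c d : List (List (String × String))) :
    l.foldl bStep (a, b, c, d)
      = (a ++ l.filter (fun gap => pvImpact gap == "high"),
         b ++ l.filter (fun gap => pvImpact gap == "medium"),
         c ++ l.filter (fun gap => pvImpact gap == "low"),
         d ++ l.filter (fun gap => !(["high", "medium", "low"].contains (pvImpact gap)))) := by
  induction l generalizing a b c d with
  | nil => simp
  | cons g t ih =>
    by_cases hh : pvImpact g = "high"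
    · simp [List.foldl_cons, bStep, hh, ih]
    · by_cases hm : pvImpact g = "medium"
      · simp [List.foldl_cons, bStep, hm, ih]
      · by_cases hl : pvImpact g = "low"
        · simp [List.foldl_cons, bStep, hl, ih]
        · simp [List.foldl_cons, bStep, hh, hm, hl, ih]

-- the inner enumerate loop accumulates exactly the joined item strings
theorem inner_eq (l : List (Int × List (String × String))) (s : String) :
    l.foldl (fun output p =>
        let output := output ++ "\n" ++ PySem.Int.toStr p.1 ++ ". " ++ pvGet p.2 "gap" "Unknown gap" ++ "\n"
        let output := output ++ "   Impact: " ++ pvGet p.2 "impact" "Not specified" ++ "\n"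
        let output := output ++ "   Evidence: " ++ pvGet p.2 "evidence" "No evidence provided" ++ "\n"
        let source := pvGet p.2 "source" "No source"
        output ++ "   Source: " ++ source ++ "\n") s
      = s ++ PySem.Str.join "" (l.map bItem) := by
  induction l generalizing s with
  | nil => simp [pv_join_nil]
  | cons p t ih =>
    rw [List.foldl_cons, ih, List.map_cons, pv_join_cons]
    simp [bItem, String.append_assoc]

-- A's section fold = appending the joined nonempty sections
theorem sections_eq (ts : List (String × List (List (String × String)) × String)) (s : String) :
    ts.foldl (fun output t =>
        if t.2.1 = [] then output
        else
          let output := output ++ t.2.2 ++ " " ++ t.1 ++ " GAPS (" ++ PySem.Int.toStr (t.2.1.length : Int) ++ ")\n" ++ "----------------------------------------" ++ "\n"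
          let output := (PySem.List.enumerate t.2.1 1).foldl (fun output p =>
            let output := output ++ "\n" ++ PySem.Int.toStr p.1 ++ ". " ++ pvGet p.2 "gap" "Unknown gap" ++ "\n"
            let output := output ++ "   Impact: " ++ pvGet p.2 "impact" "Not specified" ++ "\n"
            let output := output ++ "   Evidence: " ++ pvGet p.2 "evidence" "No evidence provided" ++ "\n"
            let source := pvGet p.2 "source" "No source"
            output ++ "   Source: " ++ source ++ "\n") output
          output ++ "\n") s
      = s ++ PySem.Str.join "" ((ts.filter (fun t => !t.2.1.isEmpty)).map (fun t => bSection t.1 t.2.2 t.2.1)) := by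
  induction ts generalizing s with
  | nil => simp [pv_join_nil]
  | cons t ts ih =>
    by_cases hb : t.2.1 = []
    · simp [List.foldl_cons, hb, ih]
    · simp only [List.foldl_cons, List.filter_cons, if_neg hb]
      rw [inner_eq, ih]
      simp [hb, pv_join_cons, bSection, String.append_assoc]

-- ===== VERDICT (by name: the statement is the Claim_ definition above) =====
theorem style_gap_analysis_data_spec : Claim_equal_style_gap_analysis_data := by
  intro data _
  unfold Spec_style_gap_analysis_data style_gap_analysis_data style_gap_analysis_data_alt
  by_cases h : data = []
  · simp [h]
  · simp only [h, if_false]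
    rw [bucket_eq, sections_eq]
    simp
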